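-- pv_equiv track=rewrite | github.com/norahnan/Fluid-flow | Braid.py | DynIntL
-- ===== SOURCE A (Python) =====
-- def DynIntL(ui):
--     nt = int((len(ui)+4)/2) #total number of strands
--     #cut up ui to help with notation
--     a = ui[:nt-2]
--     b = ui[nt-2:]
--     L = abs(a[0]) + abs(a[nt-3])
--     Ltemp = 0
--     for i in range(0,nt-3):
--         Ltemp += abs(a[i+1]-a[i])
--     L += Ltemp
--     b0i = abs(a[0]) + max(b[0],0)
--     bacc = 0
--     for i in range(1,nt-2):
--         bacc += b[i-1]
--         b0itemp = abs(a[i]) + max(b[i],0) + bacc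
--         if b0itemp > b0i:
--             b0i = b0itemp
--     b0 = -1*b0i
--     bftemp = 0
--     btemp = 0
--     for i in range(0,nt-2):
--         bftemp += b[i]
--         btemp += abs(b[i])
--     bf = -1*b0 - bftemp
--     L += btemp + abs(b0) + abs(bf)
--     return L
-- ===== SOURCE B (Python) =====
-- def DynIntL(ui):
--     m = (len(ui) + 4) // 2 - 2
--     a = ui[:m]
--     b = ui[m:]
--     x0, xm = a[0], a[m - 1]
--     # single backward pass over the strand pairs: the max-with-prefix-sum quantity
--     # satisfies the suffix recurrence best = max(term, y + best), so no prefix sums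
--     # (and no running maximum with an accumulator) are needed
--     best = None
--     sumb = 0
--     sababs = 0
--     adj = 0
--     prev_a = None
--     for x, y in reversed(list(zip(a, b))):
--         term = abs(x) + max(y, 0)
--         best = term if best is None else max(term, y + best)
--         sumb += y
--         sababs += abs(y)
--         if prev_a is not None:
--             adj += abs(prev_a - x)
--         prev_a = x
--     bf = best - sumb
--     return abs(x0) + abs(xm) + adj + sababs + best + abs(bf)
-- ===== Notes on version B (the rewrite author's own statement) =====
-- stated objective: alternative
-- what changed: Replaces A's three forward loops (adjacent-difference sum, running prefix accumulator with running max, two-accumulator sum pass) by one single backward pass over the zipped strand pairs that computes the maximum via the suffix recurrence best = max(term, y + best), eliminating prefix sums entirely.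
-- outside the precondition, e.g. on DynIntL([0]): A raises IndexError, B raises IndexError
import Mathlib
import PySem

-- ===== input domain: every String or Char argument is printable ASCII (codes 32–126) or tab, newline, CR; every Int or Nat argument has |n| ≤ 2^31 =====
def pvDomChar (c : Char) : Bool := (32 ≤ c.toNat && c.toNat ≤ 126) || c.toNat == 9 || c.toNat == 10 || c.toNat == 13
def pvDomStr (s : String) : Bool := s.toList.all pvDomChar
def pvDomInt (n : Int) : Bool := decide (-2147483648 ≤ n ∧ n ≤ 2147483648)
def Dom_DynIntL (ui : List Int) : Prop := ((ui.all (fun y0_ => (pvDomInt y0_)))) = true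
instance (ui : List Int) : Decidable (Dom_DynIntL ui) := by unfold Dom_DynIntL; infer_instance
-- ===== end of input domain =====

-- B replaces A's three forward loops by one single backward pass over the zipped strand
-- pairs, computing the max quantity with the suffix recurrence best = max(term, y + best)
-- instead of a running prefix accumulator (objective: alternative, same cost).

-- ===== PORT A =====
-- literal transliteration of A; a[i]/b[i] are in range on every admitted input, so pyGetD's
-- default 0 is never read under Pre_.
def DynIntL (ui : List Int) : Int :=
  let nt : Int := PySem.Int.floordiv ((ui.length : Int) + 4) 2
  let a : List Int := PySem.List.slice ui none (some (nt - 2))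
  let b : List Int := PySem.List.slice ui (some (nt - 2)) none
  let L0 : Int := |PySem.List.pyGetD a 0 0| + |PySem.List.pyGetD a (nt - 3) 0|
  let Ltemp : Int := (PySem.List.pyRange 0 (nt - 3) 1).foldl
      (fun acc i => acc + |PySem.List.pyGetD a (i + 1) 0 - PySem.List.pyGetD a i 0|) 0
  let L1 := L0 + Ltemp
  let p := (PySem.List.pyRange 1 (nt - 2) 1).foldl
      (fun (s : Int × Int) i =>
        let bacc := s.2 + PySem.List.pyGetD b (i - 1) 0
        let b0itemp := |PySem.List.pyGetD a i 0| + max (PySem.List.pyGetD b i 0) 0 + bacc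
        (if b0itemp > s.1 then b0itemp else s.1, bacc))
      (|PySem.List.pyGetD a 0 0| + max (PySem.List.pyGetD b 0 0) 0, 0)
  let b0 : Int := -1 * p.1
  let q := (PySem.List.pyRange 0 (nt - 2) 1).foldl
      (fun (s : Int × Int) i => (s.1 + PySem.List.pyGetD b i 0, s.2 + |PySem.List.pyGetD b i 0|)) (0, 0)
  let bf : Int := -1 * b0 - q.1
  L1 + q.2 + |b0| + |bf|

-- ===== PORT B =====
-- literal transliteration of Source B: one foldl over the REVERSED zip list carrying the Python
-- loop state (best : Option, sumb, sababs, adj, prev_a : Option); under Pre_ the zip list is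
-- nonempty so best's .getD 0 default (Python's None) is never read.
def stepB (s : Option Int × Int × Int × Int × Option Int) (q : Int × Int) :
    Option Int × Int × Int × Int × Option Int :=
  let term : Int := |q.1| + max q.2 0
  let best : Int := match s.1 with | none => term | some bb => max term (q.2 + bb)
  (some best, s.2.1 + q.2, s.2.2.1 + |q.2|,
   s.2.2.2.1 + (match s.2.2.2.2 with | none => 0 | some pa => |pa - q.1|), some q.1)

def DynIntL_alt (ui : List Int) : Int :=
  let m : Int := PySem.Int.floordiv ((ui.length : Int) + 4) 2 - 2
  let a : List Int := PySem.List.slice ui none (some m)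
  let b : List Int := PySem.List.slice ui (some m) none
  let x0 : Int := PySem.List.pyGetD a 0 0
  let xm : Int := PySem.List.pyGetD a (m - 1) 0
  let s := ((a.zip b).reverse).foldl stepB (none, 0, 0, 0, none)
  let best : Int := s.1.getD 0
  let bf : Int := best - s.2.1
  |x0| + |xm| + s.2.2.2.1 + s.2.2.1 + best + |bf|

-- ===== PRECONDITION & SPEC =====
-- Pre_ excludes exactly the inputs with fewer than 2 elements, on which Python A raises
-- IndexError at a[0] or a[nt-3] (B raises there too).
def Pre_DynIntL (ui : List Int) : Prop := 2 ≤ ui.length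
instance (ui : List Int) : Decidable (Pre_DynIntL ui) := by unfold Pre_DynIntL; infer_instance
def pvWitness_DynIntL : List Int := [1, 2]

def Spec_DynIntL (ui : List Int) (out : Int) : Prop := out = DynIntL_alt ui
instance (ui : List Int) (out : Int) : Decidable (Spec_DynIntL ui out) := by unfold Spec_DynIntL; infer_instance

-- ===== CLAIM (what is proved, stated in full; the proofs are below) =====
def Claim_equal_DynIntL : Prop := ∀ (ui : List Int), Dom_DynIntL ui → Pre_DynIntL ui → Spec_DynIntL ui (DynIntL ui)

-- ===== LEMMAS AND PROOFS =====

-- A-side closed form of the Ltemp loop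
theorem ltemp_eq (a : List Int) (m : Nat) (ha : a.length = m + 1) :
    (PySem.List.pyRange 0 (m : Int) 1).foldl
      (fun acc i => acc + |PySem.List.pyGetD a (i + 1) 0 - PySem.List.pyGetD a i 0|) 0
    = ((a.zip a.tail).map (fun p => |p.2 - p.1|)).sum := by
  rw [PySem.List.pyRange_zero_natCast, List.foldl_map, PySem.List.foldl_add]
  simp only [zero_add]
  congr 1
  apply List.ext_getElem
  · simp [ha]
  · intro i h1 h2
    simp only [List.getElem_map, List.getElem_range, List.getElem_zip, List.getElem_tail]
    have hi : i < m := by simpa using h1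
    have c1 : ((i : Int) + 1) = ((i + 1 : Nat) : Int) := by push_cast; ring
    rw [c1, PySem.List.pyGetD_natCast, PySem.List.pyGetD_natCast]
    rw [List.getD_eq_getElem?_getD, List.getD_eq_getElem?_getD,
      List.getElem?_eq_getElem (by omega), List.getElem?_eq_getElem (by omega)]
    simp

def tTerm (a b : List Int) (i : Nat) : Int :=
  |PySem.List.pyGetD a (i : Int) 0| + max (PySem.List.pyGetD b (i : Int) 0) 0 + (b.take i).sum

def bestOf (a b : List Int) : Nat → Int
  | 0 => tTerm a b 0
  | k + 1 => max (bestOf a b k) (tTerm a b (k + 1))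

theorem take_sum_succ (b : List Int) (k : Nat) :
    (b.take (k + 1)).sum = (b.take k).sum + b.getD k 0 := by
  rw [List.take_add_one, List.sum_append, List.getD_eq_getElem?_getD]
  cases h : b[k]? <;> simp_all

theorem ite_gt_eq_max (x y : Int) : (if x > y then x else y) = max y x := by
  by_cases h : x > y
  · rw [if_pos h, max_eq_right h.le]
  · rw [if_neg h, max_eq_left (not_lt.mp h)]

-- A's running-max loop computes (bestOf, prefix sum)
theorem b0i_loopA (a b : List Int) (k : Nat) :
    (PySem.List.pyRange 1 ((k : Int) + 1) 1).foldl
      (fun (s : Int × Int) i =>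
        (if |PySem.List.pyGetD a i 0| + max (PySem.List.pyGetD b i 0) 0 +
              (s.2 + PySem.List.pyGetD b (i - 1) 0) > s.1 then
           |PySem.List.pyGetD a i 0| + max (PySem.List.pyGetD b i 0) 0 +
              (s.2 + PySem.List.pyGetD b (i - 1) 0)
         else s.1, s.2 + PySem.List.pyGetD b (i - 1) 0))
      (|PySem.List.pyGetD a 0 0| + max (PySem.List.pyGetD b 0 0) 0, 0)
    = (bestOf a b k, (b.take k).sum) := by
  induction k with
  | zero =>
    rw [PySem.List.pyRange_one_eq_nil (by omega)]
    simp [bestOf, tTerm]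
  | succ k ih =>
    have hc : (((k + 1 : Nat) : Int) + 1) = ((k : Int) + 1) + 1 := by push_cast; ring
    rw [hc, PySem.List.pyRange_one_succ_right (by omega), List.foldl_append, ih]
    simp only [List.foldl_cons, List.foldl_nil]
    have h1 : ((k : Int) + 1) - 1 = (k : Int) := by ring
    have h2 : ((k : Int) + 1) = ((k + 1 : Nat) : Int) := by push_cast; ring
    rw [h1, PySem.List.pyGetD_natCast, h2, PySem.List.pyGetD_natCast, PySem.List.pyGetD_natCast]
    have hsum : (b.take k).sum + b.getD k 0 = (b.take (k + 1)).sum := (take_sum_succ b k).symm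
    rw [hsum]
    rw [Prod.mk.injEq]
    refine ⟨?_, rfl⟩
    rw [ite_gt_eq_max]
    show _ = max (bestOf a b k) (tTerm a b (k + 1))
    rw [tTerm, PySem.List.pyGetD_natCast, PySem.List.pyGetD_natCast]

theorem pair_fold_range (b : List Int) (m : Nat) (hm : m ≤ b.length) :
    (List.range m).foldl
      (fun (x : Int × Int) y => (x.1 + b.getD y 0, x.2 + |b.getD y 0|)) (0, 0)
    = ((b.take m).sum, ((b.take m).map (fun v => |v|)).sum) := by
  induction m with
  | zero => simp
  | succ m ih =>
    rw [List.range_succ, List.foldl_append, ih (by omega)]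
    simp only [List.foldl_cons, List.foldl_nil]
    have hlt : m < b.length := by omega
    have hg : b.getD m 0 = b[m] := by
      rw [List.getD_eq_getElem?_getD, List.getElem?_eq_getElem hlt]; rfl
    have ht : b.take (m + 1) = b.take m ++ [b[m]] := by
      rw [List.take_add_one, List.getElem?_eq_getElem hlt]; rfl
    rw [hg, ht]
    simp only [Prod.mk.injEq, List.map_append, List.sum_append, List.map_cons, List.map_nil,
      List.sum_cons, List.sum_nil]
    constructor <;> ring

theorem pair_fold_eq (b : List Int) (m : Nat) (hm : m ≤ b.length) :
    (PySem.List.pyRange 0 (m : Int) 1).foldl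
      (fun (s : Int × Int) i => (s.1 + PySem.List.pyGetD b i 0, s.2 + |PySem.List.pyGetD b i 0|)) (0, 0)
    = ((b.take m).sum, ((b.take m).map (fun v => |v|)).sum) := by
  rw [PySem.List.pyRange_zero_natCast, List.foldl_map]
  simp only [PySem.List.pyGetD_natCast]
  exact pair_fold_range b m hm

-- suffix-recurrence maximum of a pair list (the quantity B's backward pass computes)
def presufMax : List (Int × Int) → Int
  | [] => 0
  | [q] => |q.1| + max q.2 0
  | q :: r :: t => max (|q.1| + max q.2 0) (q.2 + presufMax (r :: t))

-- adjacent |Δfst| sum of a pair list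
def adjSum : List (Int × Int) → Int
  | [] => 0
  | [_] => 0
  | q :: r :: t => |r.1 - q.1| + adjSum (r :: t)

theorem max_shuffle (b0 a0 T P y : Int) :
    max (max b0 (T + a0)) (a0 + y + P) = max b0 (a0 + max T (y + P)) := by
  rw [max_assoc, add_comm T a0, add_assoc, max_add_add_left]

-- generic forward step matching A's loop shape, for connecting bestOf to presufMax
def stepF (s : Int × Int) (q : Int × Int) : Int × Int :=
  (max s.1 (|q.1| + max q.2 0 + s.2), s.2 + q.2)

theorem stepF_fold (p : List (Int × Int)) (hne : p ≠ []) : ∀ (b0 a0 : Int),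
    p.foldl stepF (b0, a0) = (max b0 (a0 + presufMax p), a0 + (p.map Prod.snd).sum) := by
  induction p with
  | nil => exact absurd rfl hne
  | cons q rest ih =>
    intro b0 a0
    cases rest with
    | nil => simp [stepF, presufMax]; ring_nf
    | cons r t =>
      rw [List.foldl_cons, ih (by simp)]
      simp only [stepF, presufMax, List.map_cons, List.sum_cons]
      rw [Prod.mk.injEq]
      refine ⟨max_shuffle _ _ _ _ _, by ring⟩

theorem head_le_presufMax (q : Int × Int) (rest : List (Int × Int)) :
    |q.1| + max q.2 0 ≤ presufMax (q :: rest) := by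
  cases rest with
  | nil => exact le_of_eq rfl
  | cons r t => exact le_max_left _ _

-- bestOf equals the forward fold of stepF over the zip list
theorem bestOf_stepF (a b : List Int) (m : Nat) (ha : a.length = m) (hb : m ≤ b.length) :
    ∀ k, k < m →
    ((a.zip b).take (k + 1)).foldl stepF (tTerm a b 0, 0)
      = (bestOf a b k, (b.take (k + 1)).sum) := by
  have hzlen : (a.zip b).length = m := by simp [List.length_zip]; omega
  have hget : ∀ j, (hj : j < m) → (a.zip b)[j]'(by omega) = (a[j]'(by omega), b[j]'(by omega)) := by
    intro j hj; simp [List.getElem_zip]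
  have hgetD : ∀ (l : List Int) (j : Nat), (hj : j < l.length) →
      PySem.List.pyGetD l (j : Int) 0 = l[j]'hj := by
    intro l j hj
    rw [PySem.List.pyGetD_natCast, List.getD_eq_getElem?_getD, List.getElem?_eq_getElem hj]; rfl
  intro k hk
  induction k with
  | zero =>
    have h1 : (a.zip b).take 1 = [(a[0]'(by omega), b[0]'(by omega))] := by
      rw [List.take_one]
      cases hz : a.zip b with
      | nil => exfalso; rw [hz] at hzlen; simp at hzlen; omega
      | cons q t =>
        have h0 : (a.zip b)[0]? = some ((a[0]'(by omega), b[0]'(by omega))) := by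
          rw [List.getElem?_eq_getElem (by omega)]
          rw [hget 0 (by omega)]
        rw [hz] at h0
        simp only [List.getElem?_cons_zero, Option.some.injEq] at h0
        simp [h0]
    rw [h1]
    simp only [List.foldl_cons, List.foldl_nil, stepF, bestOf, tTerm]
    rw [hgetD a 0 (by omega), hgetD b 0 (by omega)]
    have hs : (b.take 1).sum = b[0]'(by omega) := by
      rw [List.take_one]
      rw [List.head?_eq_getElem?, List.getElem?_eq_getElem (by omega)]
      simp
    rw [Prod.mk.injEq]
    constructor
    · simp
    · rw [hs]; ring
  | succ k ihk =>
    have hk' : k < m := by omega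
    have hklt : k + 1 < (a.zip b).length := by omega
    have htk : (a.zip b).take (k + 2) = (a.zip b).take (k + 1) ++ [(a.zip b)[k+1]] := by
      rw [List.take_add_one, List.getElem?_eq_getElem hklt]; rfl
    rw [htk, List.foldl_append, ihk hk']
    simp only [List.foldl_cons, List.foldl_nil, stepF]
    rw [hget (k + 1) hk]
    rw [Prod.mk.injEq]
    constructor
    · show _ = bestOf a b (k + 1)
      rw [bestOf]
      congr 1
      rw [tTerm, hgetD a (k + 1) (by omega), hgetD b (k + 1) (by omega)]
    · rw [take_sum_succ b (k + 1)]
      congr 1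
      rw [List.getD_eq_getElem?_getD, List.getElem?_eq_getElem (by omega : k + 1 < b.length)]; rfl

-- B's backward foldl (= foldr) computes presufMax, the snd sums, adjSum and the head fst
theorem foldB_eq (p : List (Int × Int)) (hne : p ≠ []) :
    p.foldr (fun q s => stepB s q) (none, 0, 0, 0, none)
    = (some (presufMax p), (p.map Prod.snd).sum, ((p.map Prod.snd).map (fun v => |v|)).sum,
       adjSum p, some ((p.headD (0, 0)).1)) := by
  induction p with
  | nil => exact absurd rfl hne
  | cons q rest ih =>
    cases rest with
    | nil => simp [stepB, presufMax, adjSum]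
    | cons r t =>
      rw [List.foldr_cons, ih (by simp)]
      simp only [stepB, presufMax, adjSum, List.map_cons, List.sum_cons, List.headD_cons]
      simp only [Prod.mk.injEq]
      exact ⟨trivial, by ring, by ring, by ring, trivial⟩

-- fst/snd projections of the zip list
theorem map_snd_zip_take (a b : List Int) (h : a.length ≤ b.length) :
    (a.zip b).map Prod.snd = b.take a.length := by
  induction a generalizing b with
  | nil => simp
  | cons x xs ih =>
    cases b with
    | nil => simp at h
    | cons y ys => simp_all [List.zip_cons_cons]

theorem adjSum_zip (a b : List Int) (h : a.length ≤ b.length) :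
    adjSum (a.zip b) = ((a.zip a.tail).map (fun p => |p.2 - p.1|)).sum := by
  induction a generalizing b with
  | nil => simp [adjSum]
  | cons x xs ih =>
    cases b with
    | nil => simp at h
    | cons y ys =>
      cases xs with
      | nil => simp [adjSum]
      | cons x' xt =>
        cases ys with
        | nil => simp at h
        | cons y' yt =>
          simp only [List.zip_cons_cons, adjSum, List.tail_cons, List.map_cons, List.sum_cons]
          have := ih (y' :: yt) (by simp at h ⊢; omega)
          simp only [List.zip_cons_cons] at this
          rw [this]
          rfl

theorem pyGetD_cons_zero (x : Int) (xs : List Int) :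
    PySem.List.pyGetD (x :: xs) ((0 : Nat) : Int) 0 = x := by
  rw [PySem.List.pyGetD_natCast]; rfl

theorem t0_le_presufMax (a b : List Int) (ha : a ≠ []) (hb : b ≠ []) :
    tTerm a b 0 ≤ presufMax (a.zip b) := by
  cases a with
  | nil => exact absurd rfl ha
  | cons x xs =>
    cases b with
    | nil => exact absurd rfl hb
    | cons y ys =>
      rw [List.zip_cons_cons]
      refine le_trans (le_of_eq ?_) (head_le_presufMax (x, y) (xs.zip ys))
      rw [tTerm, pyGetD_cons_zero, pyGetD_cons_zero]
      simp

theorem t0_nonneg (a b : List Int) : 0 ≤ tTerm a b 0 := by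
  rw [tTerm]
  have h1 := abs_nonneg (PySem.List.pyGetD a ((0 : Nat) : Int) 0)
  have h2 := le_max_right (PySem.List.pyGetD b ((0 : Nat) : Int) 0) (0 : Int)
  simp only [List.take_zero, List.sum_nil]
  omega

theorem bestOf_ge_t0 (a b : List Int) : ∀ k, tTerm a b 0 ≤ bestOf a b k := by
  intro k
  induction k with
  | zero => exact le_of_eq rfl
  | succ k ih => exact le_trans ih (le_max_left _ _)

-- ===== VERDICT (by name: the statement is the Claim_ definition above) =====
theorem DynIntL_spec : Claim_equal_DynIntL := by
  intro ui _ hpre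
  have hn : 2 ≤ ui.length := hpre
  unfold Spec_DynIntL
  simp only [DynIntL, DynIntL_alt]
  have hfd : PySem.Int.floordiv ((ui.length : Int) + 4) 2 = (((ui.length + 4) / 2 : Nat) : Int) := by
    have h4 : ((ui.length : Int) + 4) = ((ui.length + 4 : Nat) : Int) := by push_cast; ring
    rw [h4]
    exact_mod_cast PySem.Int.floordiv_natCast (ui.length + 4) 2
  rw [hfd]
  set K : Nat := (ui.length + 4) / 2 with hKdef
  have hK3 : 3 ≤ K := by omega
  set M : Nat := K - 2 with hMdef
  have hM1 : 1 ≤ M := by omega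
  have hMlen : M ≤ ui.length := by omega
  have e2 : ((K : Int) - 2) = ((M : Nat) : Int) := by omega
  have e3 : ((K : Int) - 3) = (((M - 1 : Nat)) : Int) := by omega
  have e3' : ((M : Nat) : Int) - 1 = (((M - 1 : Nat)) : Int) := by omega
  rw [e2, e3, e3']
  rw [PySem.List.slice_to_natCast, PySem.List.slice_from_natCast]
  set a : List Int := ui.take M with hadef
  set b : List Int := ui.drop M with hbdef
  have ha : a.length = M := by simp [hadef]; omega
  have hb : M ≤ b.length := by simp [hbdef]; omega
  -- A side
  rw [ltemp_eq a (M - 1) (by omega)]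
  have hA := b0i_loopA a b (M - 1)
  rw [show (((M - 1 : Nat) : Int) + 1) = ((M : Nat) : Int) from by omega] at hA
  rw [hA]
  rw [pair_fold_eq b M hb]
  -- B side
  rw [List.foldl_reverse]
  have hz : (a.zip b).length = M := by simp [List.length_zip]; omega
  have hzne : a.zip b ≠ [] := by
    intro h; rw [h] at hz; simp at hz; omega
  rw [foldB_eq (a.zip b) hzne]
  -- connect bestOf to presufMax via the forward fold
  have hFB := bestOf_stepF a b M ha hb (M - 1) (by omega)
  rw [show M - 1 + 1 = M from by omega, List.take_of_length_le (le_of_eq hz)] at hFB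
  have hSF := stepF_fold (a.zip b) hzne (tTerm a b 0) 0
  rw [hFB] at hSF
  have hbest : bestOf a b (M - 1) = presufMax (a.zip b) := by
    have h1 : bestOf a b (M - 1) = max (tTerm a b 0) (0 + presufMax (a.zip b)) :=
      congrArg Prod.fst hSF
    rw [zero_add] at h1
    rw [h1]
    exact max_eq_right (t0_le_presufMax a b
      (by intro h; rw [h] at ha; simp at ha; omega)
      (by intro h; rw [h] at hb; simp at hb; omega))
  have hnn : 0 ≤ bestOf a b (M - 1) := le_trans (t0_nonneg a b) (bestOf_ge_t0 a b (M - 1))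
  have hsnd : (a.zip b).map Prod.snd = b.take M := by
    rw [map_snd_zip_take a b (by omega), ha]
  rw [adjSum_zip a b (by omega), hsnd]
  simp only [Option.getD_some]
  rw [← hbest]
  have habs1 : |(-1 : Int) * bestOf a b (M - 1)| = bestOf a b (M - 1) := by
    rw [neg_one_mul, abs_neg, abs_of_nonneg hnn]
  rw [habs1]
  have habs2 : (-1 : Int) * ((-1 : Int) * bestOf a b (M - 1)) - (b.take M).sum
      = bestOf a b (M - 1) - (b.take M).sum := by ring
  rw [habs2]
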